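-- pv_equiv track=rewrite | github.com/miniSlavik-1/PaboTa | Python/Module17/02_generation/main.py | spisok
-- ===== SOURCE A (Python) =====
-- def spisok(dlin: int):
--     mass = []
--     for char in range(dlin):
--         if char % 2 == 0:
--             mass.append(1)
--         else:
--             mass.append(char % 5)
--     return mass
-- ===== SOURCE B (Python) =====
-- def spisok(dlin: int):
--     mass = [1] * dlin
--     for i in range(1, dlin, 2):
--         mass[i] = i % 5
--     return mass
-- ===== Notes on version B (the rewrite author's own statement) =====
-- stated objective: simpler
-- what changed: Replaces the per-element if/else loop by a bulk all-ones initialization plus a strided loop over only the odd indices that overwrites them with i % 5.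
import Mathlib
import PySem

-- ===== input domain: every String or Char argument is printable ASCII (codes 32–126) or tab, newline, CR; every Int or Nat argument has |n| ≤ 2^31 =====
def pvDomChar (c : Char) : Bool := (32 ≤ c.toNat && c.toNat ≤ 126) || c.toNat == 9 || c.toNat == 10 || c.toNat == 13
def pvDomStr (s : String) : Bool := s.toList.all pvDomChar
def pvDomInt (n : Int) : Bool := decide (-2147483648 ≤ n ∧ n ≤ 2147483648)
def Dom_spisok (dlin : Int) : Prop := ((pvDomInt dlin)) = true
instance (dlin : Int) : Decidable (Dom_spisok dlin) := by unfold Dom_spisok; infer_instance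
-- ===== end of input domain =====

-- ===== PORT A =====
-- for char in range(dlin): append 1 on even char, char % 5 on odd char
def spisok (dlin : Int) : List Int :=
  (PySem.List.pyRange 0 dlin 1).foldl
    (fun mass c => mass ++ [if c % 2 == 0 then (1 : Int) else c % 5]) []

-- ===== PORT B =====
-- B: mass = [1]*dlin, then patch every odd index i with i % 5
def spisok_alt (dlin : Int) : List Int :=
  (PySem.List.pyRange 1 dlin 2).foldl
    (fun mass i => PySem.List.pySetD mass i (i % 5))
    (List.replicate dlin.toNat 1)

-- ===== PRECONDITION & SPEC =====
def Spec_spisok (dlin : Int) (out : List Int) : Prop := out = spisok_alt dlin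
instance (dlin : Int) (out : List Int) : Decidable (Spec_spisok dlin out) := by unfold Spec_spisok; infer_instance

-- ===== CLAIM (what is proved, stated in full; the proofs are below) =====
def Claim_equal_spisok : Prop := ∀ (dlin : Int), Dom_spisok dlin → Spec_spisok dlin (spisok dlin)

-- ===== LEMMAS AND PROOFS =====

-- A's append-loop is a map over the range
theorem foldl_append_map (f : Int → Int) (l : List Int) (init : List Int) :
    l.foldl (fun a x => a ++ [f x]) init = init ++ l.map f := by
  induction l generalizing init with
  | nil => simp
  | cons x xs ih => simp [List.foldl_cons, ih]

-- the value at index j after patching mass at the (nonnegative, pairwise value-determined) indices of l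
theorem patch_getElem? (l : List Int) (h0 : ∀ i ∈ l, 0 ≤ i) (mass : List Int) (j : Nat) :
    (l.foldl (fun m i => PySem.List.pySetD m i (i % 5)) mass)[j]? =
      if (j : Int) ∈ l ∧ j < mass.length then some ((j : Int) % 5) else mass[j]? := by
  induction l generalizing mass with
  | nil => simp
  | cons i xs ih =>
    have hi : 0 ≤ i := h0 i (by simp)
    rw [List.foldl_cons, PySem.List.pySetD_of_nonneg _ _ hi,
        ih (fun a ha => h0 a (by simp [ha]))]
    simp only [List.length_set, List.mem_cons, List.getElem?_set]
    by_cases hj : (j : Int) ∈ xs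
    · by_cases hlen : j < mass.length
      · simp [hj, hlen]
      · simp [hj, hlen]
        omega
    · by_cases heq : i = (j : Int)
      · have ht : i.toNat = j := by omega
        by_cases hlen : j < mass.length
        · simp [hj, heq, hlen]
        · simp [hj, hlen, ht]
      · have hne : ¬ (i.toNat = j) := by omega
        by_cases hlen : j < mass.length
        · simp [hj, heq, hlen, hne, Eq.comm]
        · simp [hj, heq, hlen, hne, Eq.comm]

-- ===== VERDICT (by name: the statement is the Claim_ definition above) =====
theorem spisok_spec : Claim_equal_spisok := by
  intro dlin _
  show spisok dlin = spisok_alt dlin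
  unfold spisok spisok_alt
  rw [foldl_append_map, PySem.List.pyRange_one]
  simp only [List.nil_append, List.map_map]
  apply List.ext_getElem?
  intro j
  rw [patch_getElem? _ (fun i hi => by
        have := (PySem.List.mem_pyRange_iff_of_pos (by norm_num : (0:Int) < 2) i).1 hi
        omega)]
  simp only [List.length_replicate]
  by_cases hj : j < dlin.toNat
  · have hrange : j < (dlin - 0).toNat := by omega
    rw [List.getElem?_map, List.getElem?_range hrange]
    by_cases hodd : j % 2 = 1
    · have hmem : (j : Int) ∈ PySem.List.pyRange 1 dlin 2 := by
        rw [PySem.List.mem_pyRange_iff_of_pos (by norm_num : (0:Int) < 2)]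
        omega
      rw [if_pos ⟨hmem, hj⟩]
      have hc : ((0 + (j:Int)) % 2 == 0) = false := by simp; omega
      simp [Function.comp]
      intro h
      omega
    · have hmem : (j : Int) ∉ PySem.List.pyRange 1 dlin 2 := by
        rw [PySem.List.mem_pyRange_iff_of_pos (by norm_num : (0:Int) < 2)]
        omega
      rw [if_neg (by tauto)]
      have hc : ((0 + (j:Int)) % 2 == 0) = true := by simp; omega
      simp [Function.comp, hj]
      intro h
      omega
  · rw [if_neg (by omega)]
    rw [List.getElem?_eq_none (by simp; omega), List.getElem?_eq_none (by simp; omega)]
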